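-- pv_equiv track=rewrite | github.com/Veldora/C4T---Dinh-Quang-Minh | Algorithm/base_change.py | base_change_to_decimal
-- ===== SOURCE A (Python) =====
-- def base_change_to_decimal(number, base):
--     factor = 1
--     temp = 0
--     while number > 0:
--         temp += number % 10 * factor
--         factor *= base
--         number = number // 10
--     return temp
-- ===== SOURCE B (Python) =====
-- def base_change_to_decimal(number, base):
--     # Collect decimal digits (least-significant first), then Horner from the most-significant end.
--     digits = []
--     while number > 0:
--         digits.append(number % 10)
--         number //= 10
--     result = 0
--     for d in reversed(digits):
--         result = result * base + d
--     return result
-- ===== Notes on version B (the rewrite author's own statement) =====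
-- stated objective: alternative
-- what changed: B first extracts the decimal digits into a list and then evaluates with Horner's method over the digits most-significant first (single accumulator), instead of A's one-pass accumulation with an explicit power-of-base factor.
import Mathlib
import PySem

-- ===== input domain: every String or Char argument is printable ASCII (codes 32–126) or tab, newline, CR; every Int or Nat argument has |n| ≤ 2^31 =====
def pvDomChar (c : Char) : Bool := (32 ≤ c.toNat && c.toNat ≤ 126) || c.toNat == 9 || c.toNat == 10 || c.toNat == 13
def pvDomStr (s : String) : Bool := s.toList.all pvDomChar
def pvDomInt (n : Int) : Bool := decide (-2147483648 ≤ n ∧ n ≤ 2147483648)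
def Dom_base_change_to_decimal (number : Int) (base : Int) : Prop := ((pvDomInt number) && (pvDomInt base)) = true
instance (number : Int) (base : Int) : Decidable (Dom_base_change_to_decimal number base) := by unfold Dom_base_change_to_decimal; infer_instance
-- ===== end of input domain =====

-- B replaces A's factor-accumulating digit loop by digit extraction followed by Horner evaluation (alternative decomposition, same cost); proved equal on all inputs.



-- ===== PORT A =====
-- while-loop of A as structural/WF recursion over (number, factor, temp)
def pvLoopA (base : Int) (number : Int) (factor : Int) (temp : Int) : Int :=
  if h : number > 0 then
    pvLoopA base (PySem.Int.floordiv number 10) (factor * base) (temp + PySem.Int.mod number 10 * factor)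
  else temp
termination_by number.toNat
decreasing_by
  rw [PySem.Int.floordiv_eq_ediv_of_pos (by omega)]
  omega

def base_change_to_decimal (number : Int) (base : Int) : Int :=
  pvLoopA base number 1 0

-- ===== PORT B =====
-- digit-extraction loop of B (least-significant first)
def pvDigits (number : Int) : List Int :=
  if h : number > 0 then
    PySem.Int.mod number 10 :: pvDigits (PySem.Int.floordiv number 10)
  else []
termination_by number.toNat
decreasing_by
  rw [PySem.Int.floordiv_eq_ediv_of_pos (by omega)]
  omega

def base_change_to_decimal_alt (number : Int) (base : Int) : Int :=
  (pvDigits number).reverse.foldl (fun r d => r * base + d) 0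

-- ===== PRECONDITION & SPEC =====
def Spec_base_change_to_decimal (number : Int) (base : Int) (out : Int) : Prop := out = base_change_to_decimal_alt number base
instance (number : Int) (base : Int) (out : Int) : Decidable (Spec_base_change_to_decimal number base out) := by unfold Spec_base_change_to_decimal; infer_instance

-- ===== CLAIM (what is proved, stated in full; the proofs are below) =====
def Claim_equal_base_change_to_decimal : Prop := ∀ (number : Int) (base : Int), Dom_base_change_to_decimal number base → Spec_base_change_to_decimal number base (base_change_to_decimal number base)

-- ===== LEMMAS AND PROOFS =====


theorem pvHorner_cons (base d : Int) (l : List Int) :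
    ((d :: l).reverse.foldl (fun r x => r * base + x) 0) =
    d + base * (l.reverse.foldl (fun r x => r * base + x) 0) := by
  simp [List.foldl_append]
  ring

theorem pvLoopA_eq (base : Int) (n factor temp : Int) :
    pvLoopA base n factor temp =
      temp + factor * ((pvDigits n).reverse.foldl (fun r d => r * base + d) 0) := by
  fun_induction pvLoopA base n factor temp with
  | case1 n factor temp h ih =>
      rw [pvDigits]
      simp only [h, dif_pos]
      rw [pvHorner_cons, ih]
      ring
  | case2 n factor temp h =>
      rw [pvDigits]
      simp only [h, dif_neg, not_false_iff]
      simp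

-- ===== VERDICT (by name: the statement is the Claim_ definition above) =====
theorem base_change_to_decimal_spec : Claim_equal_base_change_to_decimal := by
  intro number base _
  unfold Spec_base_change_to_decimal base_change_to_decimal base_change_to_decimal_alt
  rw [pvLoopA_eq]
  ring
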